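-- pv_equiv track=rewrite | github.com/tue-ees-5xwg0/power-system-simulation-kA | src/power_system_simulation/graph_processing.py | _has_vertex_ids
-- ===== SOURCE A (Python) =====
-- from typing import List, Tuple
--
-- def _has_vertex_ids(vertex_ids: List[int], edge_vertex_id_pairs: List[Tuple[int, int]]):
--     """
--     Check if all vertex_ids int the edge_vertex_id_pairs list map to an existing vertex_id.
--     """
--
--     for pair in edge_vertex_id_pairs:
--         for vertex_origin in pair:
--             check = False
--             for vertex_check in vertex_ids:
--                 if vertex_origin == vertex_check:
--                     check = True
--             if not check:
--                 return False
--     return True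
-- ===== SOURCE B (Python) =====
-- def _has_vertex_ids(vertex_ids, edge_vertex_id_pairs):
--     # Sort-then-merge: sort the distinct edge endpoints and the distinct vertex ids,
--     # then check containment with one two-pointer sweep over the two sorted lists.
--     ends = sorted({v for pair in edge_vertex_id_pairs for v in pair})
--     verts = sorted(set(vertex_ids))
--     i = 0
--     for e in ends:
--         while i < len(verts) and verts[i] < e:
--             i += 1
--         if i == len(verts) or verts[i] != e:
--             return False
--     return True
-- ===== Notes on version B (the rewrite author's own statement) =====
-- stated objective: alternative
-- what changed: Replaces the triple-nested membership scan with early return by a sort-then-scan algorithm: sort the distinct edge endpoints and the distinct vertex ids, then decide containment with a single two-pointer merge sweep over the two sorted lists.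
import Mathlib
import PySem

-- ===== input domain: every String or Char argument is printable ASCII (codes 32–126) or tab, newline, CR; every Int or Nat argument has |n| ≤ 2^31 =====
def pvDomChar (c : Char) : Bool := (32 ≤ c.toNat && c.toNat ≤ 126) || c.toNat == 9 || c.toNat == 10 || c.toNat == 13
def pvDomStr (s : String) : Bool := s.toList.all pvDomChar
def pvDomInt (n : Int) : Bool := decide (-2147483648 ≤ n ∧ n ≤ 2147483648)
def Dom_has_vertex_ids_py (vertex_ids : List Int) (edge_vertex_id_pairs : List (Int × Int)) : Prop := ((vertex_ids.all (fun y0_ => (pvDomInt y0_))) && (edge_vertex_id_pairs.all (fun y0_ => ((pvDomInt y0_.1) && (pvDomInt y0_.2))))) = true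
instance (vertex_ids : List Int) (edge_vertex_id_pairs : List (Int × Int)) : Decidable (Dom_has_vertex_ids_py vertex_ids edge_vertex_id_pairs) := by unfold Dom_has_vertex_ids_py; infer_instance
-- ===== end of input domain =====

-- B replaces A's triple-nested membership scan by sort-then-merge (sorted distinct endpoints
-- vs sorted distinct vertex ids, one two-pointer sweep); alternative algorithm, same results.

-- ===== PORT A =====
-- inner "for vertex_check in vertex_ids" loop: sets check := True on a match, no break
def hvCheck (vertex_ids : List Int) (vertex_origin : Int) : Bool :=
  vertex_ids.foldl (fun check vertex_check => if vertex_origin = vertex_check then true else check) false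

-- "for pair in edge_vertex_id_pairs / for vertex_origin in pair": early return False
def hvLoop (vertex_ids : List Int) : List (Int × Int) → Bool
  | [] => true
  | pair :: rest =>
    if !(hvCheck vertex_ids pair.1) then false
    else if !(hvCheck vertex_ids pair.2) then false
    else hvLoop vertex_ids rest

def has_vertex_ids_py (vertex_ids : List Int) (edge_vertex_id_pairs : List (Int × Int)) : Bool :=
  hvLoop vertex_ids edge_vertex_id_pairs

-- ===== PORT B =====
-- the "for e in ends / while verts[i] < e: i += 1" two-pointer sweep: recursion on (ends, remaining verts)
def hvMerge : List Int → List Int → Bool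
  | [], _ => true
  | _ :: _, [] => false                          -- i == len(verts): return False
  | e :: es, v :: vs =>
    if v < e then hvMerge (e :: es) vs           -- while-step: i += 1
    else if v = e then hvMerge es (v :: vs)      -- match: next e, i unchanged
    else false                                   -- verts[i] != e: return False
termination_by ends verts => (ends.length, verts.length)

def has_vertex_ids_py_alt (vertex_ids : List Int) (edge_vertex_id_pairs : List (Int × Int)) : Bool :=
  hvMerge
    (PySem.List.sorted (PySem.Set.ofList (edge_vertex_id_pairs.flatMap (fun p => [p.1, p.2]))) (fun x => x) false)
    (PySem.List.sorted (PySem.Set.ofList vertex_ids) (fun x => x) false)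

-- ===== PRECONDITION & SPEC =====
def Spec_has_vertex_ids_py (vertex_ids : List Int) (edge_vertex_id_pairs : List (Int × Int)) (out : Bool) : Prop := out = has_vertex_ids_py_alt vertex_ids edge_vertex_id_pairs
instance (vertex_ids : List Int) (edge_vertex_id_pairs : List (Int × Int)) (out : Bool) : Decidable (Spec_has_vertex_ids_py vertex_ids edge_vertex_id_pairs out) := by unfold Spec_has_vertex_ids_py; infer_instance

-- ===== CLAIM (what is proved, stated in full; the proofs are below) =====
def Claim_equal_has_vertex_ids_py : Prop := ∀ (vertex_ids : List Int) (edge_vertex_id_pairs : List (Int × Int)), Dom_has_vertex_ids_py vertex_ids edge_vertex_id_pairs → Spec_has_vertex_ids_py vertex_ids edge_vertex_id_pairs (has_vertex_ids_py vertex_ids edge_vertex_id_pairs)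

-- ===== LEMMAS AND PROOFS =====
theorem hvCheck_foldl (vertex_ids : List Int) (v : Int) (acc : Bool) :
    vertex_ids.foldl (fun check vertex_check => if v = vertex_check then true else check) acc
      = (acc || decide (v ∈ vertex_ids)) := by
  induction vertex_ids generalizing acc with
  | nil => simp
  | cons x xs ih =>
    simp only [List.foldl_cons, ih, List.mem_cons]
    by_cases h : v = x <;> simp [h]

theorem hvCheck_iff (vertex_ids : List Int) (v : Int) :
    hvCheck vertex_ids v = true ↔ v ∈ vertex_ids := by
  unfold hvCheck
  rw [hvCheck_foldl]
  simp

theorem hvLoop_iff (vertex_ids : List Int) (edges : List (Int × Int)) :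
    hvLoop vertex_ids edges = true ↔ ∀ p ∈ edges, p.1 ∈ vertex_ids ∧ p.2 ∈ vertex_ids := by
  induction edges with
  | nil => simp [hvLoop]
  | cons p rest ih =>
    simp only [hvLoop, List.forall_mem_cons, ← hvCheck_iff]
    by_cases h1 : hvCheck vertex_ids p.1 = true <;>
      by_cases h2 : hvCheck vertex_ids p.2 = true <;> simp_all [hvCheck_iff]

-- the merge sweep decides containment of the first sorted list in the second
theorem hvMerge_iff (ends verts : List Int)
    (he : ends.Pairwise (· < ·)) (hv : verts.Pairwise (· < ·)) :
    hvMerge ends verts = true ↔ ∀ e ∈ ends, e ∈ verts := by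
  induction ends, verts using hvMerge.induct with
  | case1 verts => simp [hvMerge]
  | case2 e es =>
    rw [hvMerge]
    simp only [Bool.false_eq_true, false_iff]
    intro h
    exact absurd (h e List.mem_cons_self) (List.not_mem_nil)
  | case3 e es v vs hlt ih =>
    rw [List.pairwise_cons] at hv
    have h : hvMerge (e :: es) (v :: vs) = hvMerge (e :: es) vs := by
      rw [hvMerge]; simp [hlt]
    rw [h, ih he hv.2]
    constructor
    · intro hall x hx
      exact List.mem_cons_of_mem v (hall x hx)
    · intro hall x hx
      rcases List.mem_cons.mp (hall x hx) with rfl | hm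
      · -- x = v but every element of e :: es is ≥ e > v
        exfalso
        rcases List.mem_cons.mp hx with rfl | hm'
        · omega
        · have := (List.pairwise_cons.mp he).1 x hm'
          omega
      · exact hm
  | case4 es v vs hlt ih =>
    have h : hvMerge (v :: es) (v :: vs) = hvMerge es (v :: vs) := by
      rw [hvMerge]; simp
    rw [h, ih (List.pairwise_cons.mp he).2 hv]
    constructor
    · intro hall x hx
      rcases List.mem_cons.mp hx with rfl | hm
      · exact List.mem_cons_self
      · exact hall x hm
    · intro hall x hx
      exact hall x (List.mem_cons_of_mem v hx)
  | case5 e es v vs hlt hne =>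
    rw [hvMerge]
    simp only [if_neg hlt, if_neg hne]
    constructor
    · intro h; cases h
    · intro hall
      have he' : e ∈ v :: vs := hall e List.mem_cons_self
      rcases List.mem_cons.mp he' with rfl | hm
      · exact absurd rfl hne
      · have := (List.pairwise_cons.mp hv).1 e hm
        omega

theorem alt_iff (vertex_ids : List Int) (edges : List (Int × Int)) :
    has_vertex_ids_py_alt vertex_ids edges = true ↔
      ∀ p ∈ edges, p.1 ∈ vertex_ids ∧ p.2 ∈ vertex_ids := by
  unfold has_vertex_ids_py_alt
  rw [hvMerge_iff _ _ (PySem.List.sorted_ofList_pairwise_lt _)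
        (PySem.List.sorted_ofList_pairwise_lt _)]
  constructor
  · intro h p hp
    constructor
    · have := h p.1 (by
        rw [PySem.List.mem_sorted, PySem.Set.mem_ofList]
        exact List.mem_flatMap.mpr ⟨p, hp, by simp⟩)
      rwa [PySem.List.mem_sorted, PySem.Set.mem_ofList] at this
    · have := h p.2 (by
        rw [PySem.List.mem_sorted, PySem.Set.mem_ofList]
        exact List.mem_flatMap.mpr ⟨p, hp, by simp⟩)
      rwa [PySem.List.mem_sorted, PySem.Set.mem_ofList] at this
  · intro h x hx
    rw [PySem.List.mem_sorted, PySem.Set.mem_ofList] at hx ⊢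
    obtain ⟨p, hp, hx⟩ := List.mem_flatMap.mp hx
    simp only [List.mem_cons, List.not_mem_nil, or_false] at hx
    rcases hx with rfl | rfl
    · exact (h p hp).1
    · exact (h p hp).2

-- ===== VERDICT (by name: the statement is the Claim_ definition above) =====
theorem has_vertex_ids_py_spec : Claim_equal_has_vertex_ids_py := by
  intro vertex_ids edges _
  unfold Spec_has_vertex_ids_py has_vertex_ids_py
  rw [Bool.eq_iff_iff, hvLoop_iff, alt_iff]
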